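-- pv_equiv track=rewrite | github.com/wertycin/Informatika | Ним.py | solve
-- ===== SOURCE A (Python) =====
-- def solve(n, k):
--     d = [None] * (n+1)
--     d[0] = 0
--     for i in range(1, n+1):
--         mex = [False] * (n+1)
--         for j in range(1, k+1):
--             if i - j > -1:
--                 mex[d[i-j]] = True
--         for j in range(n+1):
--              if not mex[j]:
--                  d[i] = j
--                  break
--     return d
-- ===== SOURCE B (Python) =====
-- def solve(n, k):
--     # Grundy values of the subtraction game {1..k}: closed form i % (k+1).
--     if k >= 1:
--         m = k + 1
--         return [i % m for i in range(n + 1)]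
--     return [0] * (n + 1)
-- ===== Notes on version B (the rewrite author's own statement) =====
-- stated objective: faster
-- what changed: Replaces the O(n*(n+k)) mex/dp table computation by the known closed form d[i] = i % (k+1) (all zeros when k < 1), computed in one O(n) pass.
import Mathlib
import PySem

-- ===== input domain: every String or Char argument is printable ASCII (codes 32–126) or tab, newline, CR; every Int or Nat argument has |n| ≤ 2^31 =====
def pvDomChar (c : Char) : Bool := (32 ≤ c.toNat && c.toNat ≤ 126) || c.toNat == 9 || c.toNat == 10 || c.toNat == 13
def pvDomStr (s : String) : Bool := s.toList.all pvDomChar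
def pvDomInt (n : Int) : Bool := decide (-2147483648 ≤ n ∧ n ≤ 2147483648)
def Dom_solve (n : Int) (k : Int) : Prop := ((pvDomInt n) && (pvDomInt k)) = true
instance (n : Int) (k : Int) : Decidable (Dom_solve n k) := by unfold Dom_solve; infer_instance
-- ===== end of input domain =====

-- B computes the Grundy table by the closed form i % (k+1) (zeros when k < 1) in one pass, instead of A's mex/dp double loop.

-- ===== PORT A =====
-- body of the inner loop: 'if i - j > -1: mex[d[i-j]] = True'
-- (d[i-j] is always an already-assigned entry here under Pre_, so '.getD 0' never fires; pySetD is exact since the index is in range)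
def innerStep (d : List (Option Int)) (i : Int) (mex : List Bool) (j : Int) : List Bool :=
  if i - j > -1 then
    PySem.List.pySetD mex ((PySem.List.pyGetD d (i - j) none).getD 0) true
  else mex

-- the mex scan: 'for j in range(n+1): if not mex[j]: d[i] = j; break'
def mexScan (d : List (Option Int)) (i : Int) (n : Int) (mex : List Bool) : List (Option Int) :=
  match (PySem.List.pyRange 0 (n+1) 1).find? (fun j => !(PySem.List.pyGetD mex j false)) with
  | some j => PySem.List.pySetD d i (some j)
  | none => d

-- one iteration of A's outer loop (the whole body for one i):
-- mex = [False] * (n+1); for j in range(1, k+1): …; then the mex scan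
def solveStep (n : Int) (k : Int) (d : List (Option Int)) (i : Int) : List (Option Int) :=
  mexScan d i n ((PySem.List.pyRange 1 (k+1) 1).foldl (innerStep d i) (List.replicate (n+1).toNat false))

def solve (n : Int) (k : Int) : List Int :=
  -- d = [None] * (n+1); d[0] = 0  (IndexError when the list is empty, i.e. n < 0: excluded by Pre_)
  (PySem.List.pySet? (List.replicate (n+1).toNat (none : Option Int)) 0 (some 0)).elim []
    (fun d1 =>
      -- for i in range(1, n+1): …, then return d; d holds only ints under Pre_
      -- (every slot has been assigned), so '.getD 0' never fires there
      ((PySem.List.pyRange 1 (n+1) 1).foldl (solveStep n k) d1).map (fun o => o.getD 0))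

-- ===== PORT B =====
def solve_alt (n : Int) (k : Int) : List Int :=
  if k ≥ 1 then
    (PySem.List.pyRange 0 (n+1) 1).map (fun i => PySem.Int.mod i (k+1))
  else
    List.replicate (n+1).toNat 0

-- ===== PRECONDITION & SPEC =====
-- Pre_ excludes exactly n < 0, where A raises IndexError on 'd[0] = 0'.
def Pre_solve (n : Int) (k : Int) : Prop := 0 ≤ n
instance (n : Int) (k : Int) : Decidable (Pre_solve n k) := by unfold Pre_solve; infer_instance
def pvWitness_solve : Int × Int := (5, 2)

def Spec_solve (n : Int) (k : Int) (out : List Int) : Prop := out = solve_alt n k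
instance (n : Int) (k : Int) (out : List Int) : Decidable (Spec_solve n k out) := by unfold Spec_solve; infer_instance

-- ===== CLAIM (what is proved, stated in full; the proofs are below) =====
def Claim_equal_solve : Prop := ∀ (n : Int) (k : Int), Dom_solve n k → Pre_solve n k → Spec_solve n k (solve n k)

-- ===== LEMMAS AND PROOFS =====

-- the closed-form Grundy value
def gv (k t : Int) : Int := if k ≥ 1 then PySem.Int.mod t (k+1) else 0

-- the dp table after the outer iterations 1..i have run
def dTab (n k i : Int) : List (Option Int) :=
  (List.range (n+1).toNat).map (fun (t : Nat) => if (t : Int) ≤ i then some (gv k t) else none)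

lemma gv_nonneg (k t : Int) (ht : 0 ≤ t) : 0 ≤ gv k t := by
  unfold gv; split_ifs with h
  · exact PySem.Int.mod_nonneg _ (by omega)
  · omega

lemma gv_le (k t : Int) (ht : 0 ≤ t) : gv k t ≤ t := by
  unfold gv; split_ifs with h
  · rw [PySem.Int.mod_eq_emod_of_pos (by omega)]
    have h1 := Int.ediv_add_emod t (k+1)
    have h2 : 0 ≤ t / (k+1) := Int.ediv_nonneg ht (by omega)
    nlinarith
  · exact ht

lemma set_map_range {α : Type} (N : Nat) (f : Nat → α) (t : Nat) (v : α) :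
    ((List.range N).map f).set t v
      = (List.range N).map (fun s => if s = t then v else f s) := by
  apply List.ext_getElem
  · simp
  · intro i h1 h2
    simp only [List.getElem_set, List.getElem_map, List.getElem_range]
    by_cases h : i = t
    · subst h; simp
    · rw [if_neg (fun hh => h hh.symm), if_neg h]

-- which mex slots are set after the first c inner iterations (j = 1 .. c)
def hitBy (k i : Int) (c t : Nat) : Prop :=
  ∃ jj : Nat, jj < c ∧ 0 ≤ i - (jj + 1) ∧ gv k (i - (jj + 1)) = (t : Int)

-- boolean form of hitBy, used as the value of the mex slots
def hitB (k i : Int) (c t : Nat) : Bool :=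
  (List.range c).any (fun jj => decide (0 ≤ i - (jj + 1)) && decide (gv k (i - (jj + 1)) = (t : Int)))

lemma hitB_iff (k i : Int) (c t : Nat) : hitB k i c t = true ↔ hitBy k i c t := by
  unfold hitB hitBy
  simp [List.any_eq_true]

lemma dTab_getD (n k i x : Int) (hx : 0 ≤ x) (hxn : x ≤ n) :
    PySem.List.pyGetD (dTab n k i) x none
      = (if x ≤ i then some (gv k x) else none) := by
  unfold dTab
  rw [PySem.List.pyGetD_of_nonneg _ _ hx,
    PySem.List.getD_map_range _ _ _ _ (by omega)]
  rw [show ((x.toNat : Int)) = x by omega]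

lemma mex_inner (n k i : Int) (hi : 1 ≤ i) (hin : i ≤ n) (c : Nat) :
    ((List.range c).map (fun (a : Nat) => (1:Int) + a)).foldl (innerStep (dTab n k (i-1)) i)
      (List.replicate (n+1).toNat false)
    = (List.range (n+1).toNat).map (fun (t : Nat) => hitB k i c t) := by
  induction c with
  | zero =>
    simp only [List.range_zero, List.map_nil, List.foldl_nil]
    apply List.ext_getElem
    · simp
    · intro j h1 h2
      simp [hitB]
  | succ c ih =>
    rw [List.range_succ, List.map_append, List.foldl_append, ih]
    simp only [List.map_cons, List.map_nil, List.foldl_cons, List.foldl_nil]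
    unfold innerStep
    by_cases hc : i - (1 + (c:Int)) > -1
    · rw [if_pos hc]
      have hx : (0:Int) ≤ i - (1 + c) := by omega
      have hxn : i - (1 + (c:Int)) ≤ n := by omega
      rw [dTab_getD n k (i-1) _ hx hxn, if_pos (by omega), Option.getD_some]
      have hg0 : 0 ≤ gv k (i - (1 + c)) := gv_nonneg _ _ hx
      have hgl : gv k (i - (1 + c)) ≤ i - (1 + c) := gv_le _ _ hx
      rw [PySem.List.pySetD_of_nonneg _ _ hg0, set_map_range]
      apply List.map_congr_left
      intro s hs
      simp only [List.mem_range] at hs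
      by_cases h : s = (gv k (i - (1 + c))).toNat
      · rw [if_pos h]
        have hhit : hitBy k i (c+1) s := by
          refine ⟨c, by omega, by push_cast; omega, ?_⟩
          rw [show i - ((c:Int) + 1) = i - (1 + (c:Int)) by ring]
          omega
        simp [hitB_iff, hhit]
      · rw [if_neg h]
        rw [Bool.eq_iff_iff, hitB_iff, hitB_iff]
        unfold hitBy
        constructor
        · rintro ⟨jj, hj1, hj2, hj3⟩; exact ⟨jj, by omega, hj2, hj3⟩
        · rintro ⟨jj, hj1, hj2, hj3⟩
          refine ⟨jj, ?_, hj2, hj3⟩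
          rcases Nat.lt_succ_iff_lt_or_eq.mp hj1 with h' | h'
          · exact h'
          · exfalso
            rw [h', show i - ((c:Int) + 1) = i - (1 + (c:Int)) by ring] at hj3
            omega
    · rw [if_neg hc]
      apply List.map_congr_left
      intro s hs
      rw [Bool.eq_iff_iff, hitB_iff, hitB_iff]
      unfold hitBy
      constructor
      · rintro ⟨jj, hj1, hj2, hj3⟩; exact ⟨jj, by omega, hj2, hj3⟩
      · rintro ⟨jj, hj1, hj2, hj3⟩
        refine ⟨jj, ?_, hj2, hj3⟩
        have : (jj:Int) ≠ c := by omega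
        omega

lemma find?_pyRange_eq (a b x : Int) (p : Int → Bool) (hax : a ≤ x) (hxb : x < b)
    (hx : p x = true) (hmin : ∀ y, a ≤ y → y < x → p y = false) :
    (PySem.List.pyRange a b 1).find? p = some x := by
  rw [PySem.List.pyRange_one_append a x b hax (by omega), List.find?_append]
  have h1 : (PySem.List.pyRange a x 1).find? p = none := by
    rw [List.find?_eq_none]
    intro y hy
    rw [PySem.List.mem_pyRange_one] at hy
    simp [hmin y hy.1 hy.2]
  rw [h1, PySem.List.pyRange_one_cons (by omega)]
  simp [List.find?_cons, hx]

-- the closed-form value itself is never hit: gv k (i-j) ≠ gv k i for 1 ≤ j ≤ k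
lemma not_hit_gv (k i : Int) (hi : 1 ≤ i) : ¬ hitBy k i k.toNat (gv k i).toNat := by
  rintro ⟨jj, h1, h2, h3⟩
  have hk1 : (1:Int) ≤ k := by by_contra h; push_neg at h; omega
  have hgi : 0 ≤ gv k i := gv_nonneg _ _ (by omega)
  have hcast : ((gv k i).toNat : Int) = gv k i := by omega
  rw [hcast] at h3
  unfold gv at h3
  rw [if_pos (by omega), if_pos (by omega),
    PySem.Int.mod_eq_emod_of_pos (by omega), PySem.Int.mod_eq_emod_of_pos (by omega)] at h3
  have hd : (k+1) ∣ (i - ((jj:Int) + 1) - i) :=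
    Int.dvd_of_emod_eq_zero (Int.emod_eq_emod_iff_emod_sub_eq_zero.mp h3)
  have hd2 : (k+1) ∣ ((jj:Int) + 1) := by
    have := hd.neg_right
    rwa [show -(i - ((jj:Int) + 1) - i) = (jj:Int) + 1 by ring] at this
  have := Int.le_of_dvd (by omega) hd2
  omega

-- every smaller value is hit
lemma hit_below (k i : Int) (hi : 1 ≤ i) (t : Nat) (ht : (t:Int) < gv k i) :
    hitBy k i k.toNat t := by
  have hk1 : (1:Int) ≤ k := by
    by_contra h; push_neg at h
    unfold gv at ht; rw [if_neg (by omega)] at ht; omega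
  unfold gv at ht
  rw [if_pos (by omega), PySem.Int.mod_eq_emod_of_pos (by omega)] at ht
  have hrlt : i % (k+1) < k + 1 := Int.emod_lt_of_pos _ (by omega)
  have hrnn : 0 ≤ i % (k+1) := Int.emod_nonneg _ (by omega)
  have h1 := Int.ediv_add_emod i (k+1)
  have h2 : 0 ≤ i / (k+1) := Int.ediv_nonneg (by omega) (by omega)
  have h3 : 0 ≤ (k+1) * (i / (k+1)) := by positivity
  -- take j = i % (k+1) - t
  refine ⟨(i % (k+1) - t - 1).toNat, by omega, by push_cast; omega, ?_⟩
  unfold gv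
  rw [if_pos (by omega), PySem.Int.mod_eq_emod_of_pos (by omega)]
  rw [show i - (((i % (k+1) - (t:Int) - 1).toNat : Int) + 1) = (t:Int) + (k+1) * (i / (k+1)) by omega]
  rw [Int.add_mul_emod_self_left]
  exact Int.emod_eq_of_lt (by omega) (by omega)

-- one outer iteration advances the table
lemma step_dTab (n k i : Int) (hi : 1 ≤ i) (hin : i ≤ n) :
    solveStep n k (dTab n k (i-1)) i = dTab n k i := by
  unfold solveStep
  have hrange : PySem.List.pyRange 1 (k+1) 1 = (List.range k.toNat).map (fun (a : Nat) => (1:Int) + a) := by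
    rw [PySem.List.pyRange_one]
    norm_num
  rw [hrange, mex_inner n k i hi hin k.toNat]
  set mex := (List.range (n+1).toNat).map (fun (t : Nat) => hitB k i k.toNat t) with hmex
  have hgi0 : 0 ≤ gv k i := gv_nonneg _ _ (by omega)
  have hgile : gv k i ≤ i := gv_le _ _ (by omega)
  obtain ⟨m, hm⟩ : ∃ m : Nat, (m : Int) = gv k i := ⟨(gv k i).toNat, by omega⟩
  have hfind : (PySem.List.pyRange 0 (n+1) 1).find?
      (fun j => !(PySem.List.pyGetD mex j false)) = some (gv k i) := by
    rw [← hm]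
    apply find?_pyRange_eq _ _ _ _ (by omega) (by omega)
    · have hg : PySem.List.pyGetD mex (m : Int) false = hitB k i k.toNat m := by
        rw [hmex, PySem.List.pyGetD_natCast, PySem.List.getD_map_range _ _ _ _ (by omega)]
      have hnh := not_hit_gv k i hi
      rw [show (gv k i).toNat = m by omega] at hnh
      rw [← hitB_iff] at hnh
      simp [hg, hnh]
    · intro y hy0 hylt
      obtain ⟨z, hz⟩ : ∃ z : Nat, (z : Int) = y := ⟨y.toNat, by omega⟩
      rw [← hz]
      have hg : PySem.List.pyGetD mex (z : Int) false = hitB k i k.toNat z := by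
        rw [hmex, PySem.List.pyGetD_natCast, PySem.List.getD_map_range _ _ _ _ (by omega)]
      simp only [hg, Bool.not_eq_eq_eq_not, Bool.not_false]
      exact (hitB_iff _ _ _ _).mpr (hit_below k i hi z (by omega))
  unfold mexScan
  rw [hfind]
  show PySem.List.pySetD (dTab n k (i-1)) i (some (gv k i)) = dTab n k i
  unfold dTab
  rw [PySem.List.pySetD_of_nonneg _ _ (by omega), set_map_range]
  apply List.map_congr_left
  intro s hs
  simp only [List.mem_range] at hs
  by_cases h : s = i.toNat
  · rw [if_pos h, if_pos (by omega)]
    rw [show ((s:Int)) = i by omega]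
  · rw [if_neg h]
    by_cases h2 : (s:Int) ≤ i - 1
    · rw [if_pos h2, if_pos (by omega)]
    · rw [if_neg h2, if_neg (by omega)]

-- the outer loop, run for the first c iterations
lemma outer_loop (n k : Int) (hn : 0 ≤ n) (c : Nat) (hc : (c:Int) ≤ n) :
    ((List.range c).map (fun (a : Nat) => (1:Int) + a)).foldl (solveStep n k) (dTab n k 0)
      = dTab n k c := by
  induction c with
  | zero => rfl
  | succ c ih =>
    rw [List.range_succ, List.map_append, List.foldl_append, ih (by omega)]
    simp only [List.map_cons, List.map_nil, List.foldl_cons, List.foldl_nil]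
    have hs := step_dTab n k ((c:Int)+1) (by omega) (by omega)
    rw [show ((c:Int)+1) - 1 = (c:Int) by ring] at hs
    rw [show (1:Int) + (c:Int) = (c:Int) + 1 by ring, hs]
    push_cast
    rfl

-- ===== VERDICT (by name: the statement is the Claim_ definition above) =====
theorem solve_spec : Claim_equal_solve := by
  unfold Claim_equal_solve Spec_solve Pre_solve
  intro n k _ hn
  unfold solve
  have hN : (n+1).toNat = n.toNat + 1 := by omega
  have hset : PySem.List.pySet? (List.replicate (n+1).toNat (none : Option Int)) 0 (some 0)
      = some (dTab n k 0) := by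
    rw [show (0:Int) = ((0:Nat):Int) by simp,
      PySem.List.pySet?_natCast _ _ _ (by simp [hN])]
    congr 1
    unfold dTab
    apply List.ext_getElem
    · simp
    · intro j h1 h2
      simp only [List.getElem_set, List.getElem_replicate, List.getElem_map, List.getElem_range]
      by_cases h : j = 0
      · subst h
        rw [if_pos rfl, if_pos (by omega)]
        unfold gv
        split_ifs with hk
        · rw [PySem.Int.mod_eq_emod_of_pos (by omega)]
          simp
        · rfl
      · rw [if_neg (fun hh => h hh.symm), if_neg (by omega)]
  rw [hset, Option.elim_some]
  have hrange : PySem.List.pyRange 1 (n+1) 1 = (List.range n.toNat).map (fun (a : Nat) => (1:Int) + a) := by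
    rw [PySem.List.pyRange_one]
    norm_num
  rw [hrange, outer_loop n k hn n.toNat (by omega),
    show ((n.toNat:Int)) = n by omega]
  unfold dTab solve_alt
  by_cases hk : k ≥ 1
  · rw [if_pos hk, PySem.List.pyRange_one, show ((n+1) - 0).toNat = (n+1).toNat by norm_num,
      List.map_map, List.map_map]
    apply List.map_congr_left
    intro s hs
    simp only [List.mem_range, Function.comp] at hs ⊢
    rw [if_pos (by omega), Option.getD_some]
    unfold gv
    rw [if_pos hk, show (0:Int) + (s:Int) = (s:Int) by ring]
  · rw [if_neg hk]
    apply List.ext_getElem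
    · simp
    · intro j h1 h2
      simp only [List.length_map, List.length_range] at h1
      simp only [List.getElem_map, List.getElem_range, List.getElem_replicate]
      rw [if_pos (by omega)]
      simp [gv, hk]
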